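-- pv_equiv track=rewrite | github.com/yznpku/HackerRank | solution/practice/algorithms/implementation/Append-and-Delete/solution.py | appendAndDelete
-- ===== SOURCE A (Python) =====
-- def appendAndDelete(s, t, k):
--     numSameChars = min(len(s), len(t))
--     for i in range(len(t)):
--         if s[:i] != t[:i]:
--             numSameChars = i - 1
--             break
--
--     diff = len(s) - numSameChars + len(t) - numSameChars
--     return 'Yes' if (diff <= k and diff % 2 == k % 2) or len(s) + len(t) < k else 'No'
-- ===== SOURCE B (Python) =====
-- def appendAndDelete(s, t, k):
--     # single pass: length of the common prefix
--     p = 0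
--     for a, b in zip(s, t):
--         if a != b:
--             break
--         p += 1
--     diff = len(s) + len(t) - 2 * p
--     return 'Yes' if (diff <= k and diff % 2 == k % 2) or len(s) + len(t) < k else 'No'
-- ===== Notes on version B (the rewrite author's own statement) =====
-- stated objective: faster
-- what changed: A rebuilds and compares both prefixes s[:i], t[:i] for every i (quadratic) and its i-1 bookkeeping overcounts the common prefix when the first mismatch sits at the last index of t; B computes the common-prefix length in one character-by-character pass.
-- intended difference: When the first mismatching character is exactly at index len(t)-1 (with len(s) >= len(t)) and k = len(s) - len(t), A's loop never breaks, it overcounts the common prefix by one and returns 'Yes' (e.g. s='ab', t='ac', k=0), while B returns 'No', which is the intended answer since turning s into t there needs len(s)-len(t)+2 operations. — e.g. on appendAndDelete("ab", "ac", 0): A returns "Yes", B returns "No"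
import Mathlib
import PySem

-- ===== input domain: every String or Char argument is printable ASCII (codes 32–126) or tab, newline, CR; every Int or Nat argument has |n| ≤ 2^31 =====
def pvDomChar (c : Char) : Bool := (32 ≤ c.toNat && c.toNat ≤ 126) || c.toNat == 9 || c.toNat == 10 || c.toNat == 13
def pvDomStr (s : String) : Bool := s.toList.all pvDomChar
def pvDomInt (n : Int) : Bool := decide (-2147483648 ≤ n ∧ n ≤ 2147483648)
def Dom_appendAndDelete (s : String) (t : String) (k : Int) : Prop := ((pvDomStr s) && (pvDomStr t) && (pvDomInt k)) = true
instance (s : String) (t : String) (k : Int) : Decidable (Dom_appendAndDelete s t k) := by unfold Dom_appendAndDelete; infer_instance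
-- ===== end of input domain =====

-- B replaces A's quadratic prefix-comparison loop by a single-pass common-prefix count
-- (and is the intended fix of A's off-by-one when the first mismatch is at index len(t)-1; see D_ below).

-- ===== PORT A =====
-- 'for i in range(len(t)): if s[:i] != t[:i]: numSameChars = i - 1; break', starting from
-- numSameChars = min(len(s), len(t)); fuel = number of remaining loop iterations (initially len(t))
def pvALoop (ls lt : List Char) : Nat → Nat → Int
  | 0, _ => ((min ls.length lt.length : Nat) : Int)
  | fuel + 1, i =>
    if PySem.List.slice ls none (some (i : Int)) ≠ PySem.List.slice lt none (some (i : Int)) then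
      (i : Int) - 1
    else
      pvALoop ls lt fuel (i + 1)

def appendAndDelete (s : String) (t : String) (k : Int) : String :=
  let numSameChars : Int := pvALoop s.toList t.toList t.toList.length 0
  let diff : Int := (s.toList.length : Int) - numSameChars + (t.toList.length : Int) - numSameChars
  if (diff ≤ k ∧ PySem.Int.mod diff 2 = PySem.Int.mod k 2) ∨
      ((s.toList.length : Int) + (t.toList.length : Int) < k) then "Yes" else "No"

-- ===== PORT B =====
-- the zip loop of Source B: count equal characters until the first mismatch
def pvCp : List Char → List Char → Nat
  | a :: as, b :: bs => if a = b then pvCp as bs + 1 else 0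
  | _, _ => 0

def appendAndDelete_alt (s : String) (t : String) (k : Int) : String :=
  let p : Nat := pvCp s.toList t.toList
  let diff : Int := (s.toList.length : Int) + (t.toList.length : Int) - 2 * (p : Int)
  if (diff ≤ k ∧ PySem.Int.mod diff 2 = PySem.Int.mod k 2) ∨
      ((s.toList.length : Int) + (t.toList.length : Int) < k) then "Yes" else "No"

-- ===== PRECONDITION & SPEC =====
-- When the first mismatching character is exactly at index len(t)-1 (with len(s) ≥ len(t)) and
-- k = len(s) - len(t), A's loop never breaks, overcounts the common prefix by one and returns "Yes"
-- (e.g. s="ab", t="ac", k=0), while B returns "No" — the intended answer, since turning s into t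
-- there needs len(s) - len(t) + 2 operations.
def D_appendAndDelete (s : String) (t : String) (k : Int) : Prop :=
  1 ≤ t.toList.length ∧ t.toList.length ≤ s.toList.length ∧
  s.toList.take (t.toList.length - 1) = t.toList.take (t.toList.length - 1) ∧
  s.toList[t.toList.length - 1]? ≠ t.toList[t.toList.length - 1]? ∧
  k = (s.toList.length : Int) - (t.toList.length : Int)
instance (s : String) (t : String) (k : Int) : Decidable (D_appendAndDelete s t k) := by
  unfold D_appendAndDelete; infer_instance

def Spec_appendAndDelete (s : String) (t : String) (k : Int) (out : String) : Prop :=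
  ¬ D_appendAndDelete s t k → out = appendAndDelete_alt s t k
instance (s : String) (t : String) (k : Int) (out : String) : Decidable (Spec_appendAndDelete s t k out) := by
  unfold Spec_appendAndDelete; infer_instance

def pvDiffWitness_appendAndDelete : String × String × Int := ("ab", "ac", 0)
def pvDiffWitnessOut_appendAndDelete : String × String := ("Yes", "No")

-- ===== CLAIM (what is proved, stated in full; the proofs are below) =====
def Claim_unchanged_appendAndDelete : Prop := ∀ (s : String) (t : String) (k : Int), Dom_appendAndDelete s t k → Spec_appendAndDelete s t k (appendAndDelete s t k)
def Claim_changed_appendAndDelete : Prop := Dom_appendAndDelete (pvDiffWitness_appendAndDelete.1) (pvDiffWitness_appendAndDelete.2.1) (pvDiffWitness_appendAndDelete.2.2) ∧ D_appendAndDelete (pvDiffWitness_appendAndDelete.1) (pvDiffWitness_appendAndDelete.2.1) (pvDiffWitness_appendAndDelete.2.2) ∧ appendAndDelete (pvDiffWitness_appendAndDelete.1) (pvDiffWitness_appendAndDelete.2.1) (pvDiffWitness_appendAndDelete.2.2) = pvDiffWitnessOut_appendAndDelete.1 ∧ appendAndDelete_alt (pvDiffWitness_appendAndDelete.1) (pvDiffWitness_appendAndDelete.2.1)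 (pvDiffWitness_appendAndDelete.2.2) = pvDiffWitnessOut_appendAndDelete.2 ∧ pvDiffWitnessOut_appendAndDelete.1 ≠ pvDiffWitnessOut_appendAndDelete.2
def Claim_exact_appendAndDelete : Prop := ∀ (s : String) (t : String) (k : Int), Dom_appendAndDelete s t k → D_appendAndDelete s t k → appendAndDelete s t k ≠ appendAndDelete_alt s t k

-- ===== LEMMAS AND PROOFS =====

lemma pvCp_le (ls lt : List Char) : pvCp ls lt ≤ min ls.length lt.length := by
  induction ls generalizing lt with
  | nil => simp [pvCp]
  | cons a as ih =>
    cases lt with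
    | nil => simp [pvCp]
    | cons b bs =>
      by_cases h : a = b <;> simp [pvCp, h]
      have := ih bs
      omega

lemma pvCp_self (ls : List Char) : pvCp ls ls = ls.length := by
  induction ls with
  | nil => rfl
  | cons a as ih => simp [pvCp, ih]

lemma take_eq_iff (ls lt : List Char) (i : Nat) :
    ls.take i = lt.take i ↔ (i ≤ pvCp ls lt ∨ ls = lt) := by
  induction ls generalizing lt i with
  | nil =>
    cases lt with
    | nil => simp
    | cons b bs =>
      cases i with
      | zero => simp
      | succ j => simp [pvCp]
  | cons a as ih =>
    cases lt with
    | nil =>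
      cases i with
      | zero => simp
      | succ j => simp [pvCp]
    | cons b bs =>
      cases i with
      | zero => simp
      | succ j =>
        by_cases h : a = b
        · subst h
          have hcp : pvCp (a :: as) (a :: bs) = pvCp as bs + 1 := by simp [pvCp]
          simp only [List.take_succ_cons, List.cons.injEq, true_and, hcp]
          rw [ih bs j]
          constructor
          · rintro (h1 | h1)
            · exact Or.inl (by omega)
            · exact Or.inr h1
          · rintro (h1 | h1)
            · exact Or.inl (by omega)
            · exact Or.inr h1
        · simp [pvCp, h, List.take_succ_cons]

-- the exact value of A's loop: the common-prefix length, except one too many in the D_ shape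
lemma pvALoop_eq (ls lt : List Char) : ∀ (fuel i : Nat), i + fuel = lt.length → i ≤ pvCp ls lt →
    pvALoop ls lt fuel i =
      (if pvCp ls lt + 1 = lt.length ∧ pvCp ls lt < ls.length
        then ((pvCp ls lt : Int) + 1) else (pvCp ls lt : Int)) := by
  have hle := pvCp_le ls lt
  intro fuel
  induction fuel with
  | zero =>
    intro i hf hip
    have h2 : pvCp ls lt = lt.length := by omega
    simp only [pvALoop]
    rw [if_neg (by omega)]
    have hmin : min ls.length lt.length = lt.length := by omega
    rw [hmin, h2]
  | succ f ihf =>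
    intro i hf hip
    have h : i < lt.length := by omega
    simp only [pvALoop]
    have heq : PySem.List.slice ls none (some (i : Int)) = PySem.List.slice lt none (some (i : Int)) := by
      rw [PySem.List.slice_to_natCast, PySem.List.slice_to_natCast]
      exact (take_eq_iff ls lt i).2 (Or.inl hip)
    rw [if_neg (by simpa using heq)]
    by_cases hlt : i < pvCp ls lt
    · exact ihf (i + 1) (by omega) (by omega)
    · -- i = pvCp ls lt < lt.length : the next iteration (or the exhausted loop) decides
      have hip' : pvCp ls lt = i := by omega
      have hne : ls ≠ lt := by
        intro hc
        rw [hc, pvCp_self] at hip'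
        omega
      cases f with
      | zero =>
        -- loop ends right after i : no break, result min(len ls, len lt)
        simp only [pvALoop]
        by_cases h4 : pvCp ls lt < ls.length
        · rw [if_pos ⟨by omega, h4⟩]
          omega
        · rw [if_neg (by omega)]
          omega
      | succ f' =>
        -- index i+1 is still in range and the prefixes of length i+1 differ: break, return i
        simp only [pvALoop]
        have hneq : ¬ (ls.take (i + 1) = lt.take (i + 1)) := by
          rw [take_eq_iff]
          push Not
          exact ⟨by omega, hne⟩
        have hslice : PySem.List.slice ls none (some ((i + 1 : Nat) : Int)) ≠
            PySem.List.slice lt none (some ((i + 1 : Nat) : Int)) := by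
          rw [PySem.List.slice_to_natCast, PySem.List.slice_to_natCast]
          exact hneq
        rw [if_pos hslice]
        rw [if_neg (by omega)]
        push_cast
        omega

-- the D_ shape is exactly "common prefix = len t - 1, mismatch at index len t - 1, len s ≥ len t"
lemma shape_iff (ls lt : List Char) :
    (1 ≤ lt.length ∧ lt.length ≤ ls.length ∧
      ls.take (lt.length - 1) = lt.take (lt.length - 1) ∧
      ls[lt.length - 1]? ≠ lt[lt.length - 1]?) ↔
    (pvCp ls lt + 1 = lt.length ∧ pvCp ls lt < ls.length) := by
  have hle := pvCp_le ls lt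
  constructor
  · rintro ⟨h1, h2, h3, h4⟩
    have h5' : lt.length - 1 ≤ pvCp ls lt := by
      rcases (take_eq_iff ls lt _).1 h3 with h5 | h5
      · exact h5
      · exact absurd (by rw [h5]) h4
    have h6 : pvCp ls lt < lt.length := by
      by_contra hcon
      have htk : ls.take lt.length = lt.take lt.length :=
        (take_eq_iff ls lt _).2 (Or.inl (by omega))
      apply h4
      have e1 : (ls.take lt.length)[lt.length - 1]? = ls[lt.length - 1]? :=
        List.getElem?_take_of_lt (by omega)
      have e2 : (lt.take lt.length)[lt.length - 1]? = lt[lt.length - 1]? :=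
        List.getElem?_take_of_lt (by omega)
      rw [← e1, ← e2, htk]
    exact ⟨by omega, by omega⟩
  · rintro ⟨h1, h2⟩
    refine ⟨by omega, by omega, (take_eq_iff ls lt _).2 (Or.inl (by omega)), ?_⟩
    intro hcon
    have htk : ls.take (pvCp ls lt + 1) = lt.take (pvCp ls lt + 1) := by
      rw [List.take_add_one, List.take_add_one]
      have h3 : lt.length - 1 = pvCp ls lt := by omega
      rw [h3] at hcon
      rw [(take_eq_iff ls lt _).2 (Or.inl le_rfl), hcon]
    rcases (take_eq_iff ls lt _).1 htk with h5 | h5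
    · omega
    · rw [h5, pvCp_self] at h1
      omega

lemma mod2 (a : Int) : PySem.Int.mod a 2 = a % 2 :=
  PySem.Int.mod_eq_emod_of_pos (by omega)

lemma main_unchanged (s t : String) (k : Int) (hD : ¬ D_appendAndDelete s t k) :
    appendAndDelete s t k = appendAndDelete_alt s t k := by
  have hle := pvCp_le s.toList t.toList
  have hloop := pvALoop_eq s.toList t.toList t.toList.length 0 (by omega) (Nat.zero_le _)
  unfold D_appendAndDelete at hD
  unfold appendAndDelete appendAndDelete_alt
  simp only [hloop, mod2]
  by_cases hsh : pvCp s.toList t.toList + 1 = t.toList.length ∧ pvCp s.toList t.toList < s.toList.length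
  · rw [if_pos hsh]
    have hk : k ≠ (s.toList.length : Int) - (t.toList.length : Int) := by
      intro hcon
      exact hD ⟨by omega, by omega,
        ((shape_iff s.toList t.toList).2 hsh).2.2.1,
        ((shape_iff s.toList t.toList).2 hsh).2.2.2, hcon⟩
    obtain ⟨hsh1, hsh2⟩ := hsh
    split_ifs with h1 h2 h2 <;> first | rfl | (exfalso; omega)
  · rw [if_neg hsh]
    have e : (s.toList.length : Int) - (pvCp s.toList t.toList : Int) + (t.toList.length : Int)
        - (pvCp s.toList t.toList : Int)
        = (s.toList.length : Int) + (t.toList.length : Int) - 2 * (pvCp s.toList t.toList : Int) := by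
      ring
    rw [e]

lemma main_exact (s t : String) (k : Int) (hD : D_appendAndDelete s t k) :
    appendAndDelete s t k ≠ appendAndDelete_alt s t k := by
  obtain ⟨h1, h2, h3, h4, h5⟩ := hD
  have hsh : pvCp s.toList t.toList + 1 = t.toList.length ∧ pvCp s.toList t.toList < s.toList.length :=
    (shape_iff s.toList t.toList).1 ⟨h1, h2, h3, h4⟩
  have hle := pvCp_le s.toList t.toList
  have hloop := pvALoop_eq s.toList t.toList t.toList.length 0 (by omega) (Nat.zero_le _)
  unfold appendAndDelete appendAndDelete_alt
  simp only [hloop, mod2]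
  rw [if_pos hsh]
  obtain ⟨hsh1, hsh2⟩ := hsh
  -- A's diff equals k exactly, so A says "Yes"
  rw [if_pos (Or.inl ⟨by omega, by omega⟩)]
  -- B's diff is k + 2 and the total length is at least k + 2, so B says "No"
  rw [if_neg (by
    push Not
    exact ⟨fun hc => by omega, by omega⟩)]
  decide

-- ===== VERDICT (by name: the statement is the Claim_ definition above) =====
theorem appendAndDelete_spec : Claim_unchanged_appendAndDelete := by
  intro s t k _ hD
  exact (main_unchanged s t k hD).symm ▸ rfl

theorem appendAndDelete_changed : Claim_changed_appendAndDelete := by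
  unfold Claim_changed_appendAndDelete; decide

theorem appendAndDelete_tight : Claim_exact_appendAndDelete := by
  intro s t k _ hD
  exact main_exact s t k hD
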